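-- pv_equiv track=rewrite | github.com/Froodooo/aoc | aoc25/12.py | parse_presents
-- ===== SOURCE A (Python) =====
-- from typing import List
--
-- def parse_presents(lines: List[str]) -> list:
--     presents_raw = [x for x in lines if '#' in x]
--     presents = [presents_raw[i:i + 3] for i in range(0, len(presents_raw), 3)]
--     presents_coordinates = []
--     for present in presents:
--         present_coordinates = []
--         for y, row in enumerate(present):
--             for x, c in enumerate(row):
--                 if c == '#':
--                     present_coordinates.append((x, y))
--         presents_coordinates.append(present_coordinates)
--     return presents_coordinates
-- ===== SOURCE B (Python) =====
-- from typing import List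
--
-- def parse_presents(lines: List[str]) -> list:
--     groups = []
--     cur = []
--     idx = 0
--     for row in lines:
--         if '#' not in row:
--             continue
--         if idx % 3 == 0 and idx > 0:
--             groups.append(cur)
--             cur = []
--         for x, c in enumerate(row):
--             if c == '#':
--                 cur.append((x, idx % 3))
--         idx += 1
--     if idx > 0:
--         groups.append(cur)
--     return groups
-- ===== Notes on version B (the rewrite author's own statement) =====
-- stated objective: alternative
-- what changed: Replaces A's chunk-into-groups-of-three-then-nested-scan with a single fused pass over the lines that starts a new group and assigns the row height via idx % 3.
import Mathlib
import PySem

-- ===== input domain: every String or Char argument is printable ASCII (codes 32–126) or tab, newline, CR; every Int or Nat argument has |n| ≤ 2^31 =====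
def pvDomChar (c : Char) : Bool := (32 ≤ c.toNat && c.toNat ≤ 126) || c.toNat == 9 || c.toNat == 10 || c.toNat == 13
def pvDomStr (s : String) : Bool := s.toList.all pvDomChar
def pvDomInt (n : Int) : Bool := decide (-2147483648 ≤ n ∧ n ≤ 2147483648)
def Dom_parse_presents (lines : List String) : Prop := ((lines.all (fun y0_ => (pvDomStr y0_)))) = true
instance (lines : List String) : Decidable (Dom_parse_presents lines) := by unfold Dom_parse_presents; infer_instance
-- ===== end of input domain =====

-- B fuses A's chunk-into-groups-of-3-then-scan into a single pass over the filtered lines using idx % 3; same return value, no speed claim.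

-- ===== PORT A =====
def parse_presents (lines : List String) : List (List (Int × Int)) :=
  let presents_raw := lines.filter (fun x => PySem.Str.isIn "#" x)
  let presents := (PySem.List.pyRange 0 (presents_raw.length : Int) 3).map
      (fun i => PySem.List.slice presents_raw (some i) (some (i + 3)))
  presents.foldl (fun presents_coordinates present =>
    let present_coordinates := (PySem.List.enumerate present 0).foldl
      (fun pc yr => (PySem.List.enumerate yr.2.toList 0).foldl
        (fun pc xc => if xc.2 == '#' then pc ++ [(xc.1, yr.1)] else pc) pc) []
    presents_coordinates ++ [present_coordinates]) []

-- ===== PORT B =====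
def parse_presents_alt (lines : List String) : List (List (Int × Int)) :=
  let st := lines.foldl
    (fun (st : List (List (Int × Int)) × List (Int × Int) × Int) row =>
      if PySem.Str.isIn "#" row then
        let st := if PySem.Int.mod st.2.2 3 = 0 ∧ 0 < st.2.2
                  then (st.1 ++ [st.2.1], ([] : List (Int × Int)), st.2.2) else st
        let cur := (PySem.List.enumerate row.toList 0).foldl
          (fun cur xc => if xc.2 == '#' then cur ++ [(xc.1, PySem.Int.mod st.2.2 3)] else cur) st.2.1
        (st.1, cur, st.2.2 + 1)
      else st)
    ([], [], 0)
  if 0 < st.2.2 then st.1 ++ [st.2.1] else st.1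

-- ===== PRECONDITION & SPEC =====
def Spec_parse_presents (lines : List String) (out : List (List (Int × Int))) : Prop := out = parse_presents_alt lines
instance (lines : List String) (out : List (List (Int × Int))) : Decidable (Spec_parse_presents lines out) := by unfold Spec_parse_presents; infer_instance

-- ===== CLAIM (what is proved, stated in full; the proofs are below) =====
def Claim_equal_parse_presents : Prop := ∀ (lines : List String), Dom_parse_presents lines → Spec_parse_presents lines (parse_presents lines)

-- ===== LEMMAS AND PROOFS =====

-- coordinates of one row at height y
def rc (y : Int) (row : String) : List (Int × Int) :=
  ((PySem.List.enumerate row.toList 0).filter (fun xc => xc.2 == '#')).map (fun xc => (xc.1, y))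

-- coordinates of a group of rows, heights starting at s
def rcList (s : Int) (l : List String) : List (Int × Int) :=
  (PySem.List.enumerate l s).flatMap (fun yr => rc yr.1 yr.2)

-- chunks of three
def chunk3 {α : Type} : List α → List (List α)
  | [] => []
  | a :: rest => (a :: rest.take 2) :: chunk3 (rest.drop 2)
termination_by l => l.length
decreasing_by simp

-- B's loop body on a kept row, and its final flush
def stepB (st : List (List (Int × Int)) × List (Int × Int) × Int) (row : String) :
    List (List (Int × Int)) × List (Int × Int) × Int :=
  let st := if PySem.Int.mod st.2.2 3 = 0 ∧ 0 < st.2.2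
            then (st.1 ++ [st.2.1], ([] : List (Int × Int)), st.2.2) else st
  let cur := (PySem.List.enumerate row.toList 0).foldl
    (fun cur xc => if xc.2 == '#' then cur ++ [(xc.1, PySem.Int.mod st.2.2 3)] else cur) st.2.1
  (st.1, cur, st.2.2 + 1)

def finishB (st : List (List (Int × Int)) × List (Int × Int) × Int) : List (List (Int × Int)) :=
  if 0 < st.2.2 then st.1 ++ [st.2.1] else st.1

lemma alt_eq_filter (lines : List String) :
    parse_presents_alt lines =
      finishB ((lines.filter (fun x => PySem.Str.isIn "#" x)).foldl stepB ([], [], 0)) := by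
  simp only [parse_presents_alt, List.foldl_filter, stepB, finishB]

lemma stepB_eq (g : List (List (Int × Int))) (c : List (Int × Int)) (i : Int) (row : String) :
    stepB (g, c, i) row =
      if PySem.Int.mod i 3 = 0 ∧ 0 < i then (g ++ [c], rc 0 row, i + 1)
      else (g, c ++ rc (PySem.Int.mod i 3) row, i + 1) := by
  unfold stepB
  by_cases h : PySem.Int.mod i 3 = 0 ∧ 0 < i
  · simp only [if_pos h]
    rw [PySem.List.foldl_append_if (fun xc : Int × Char => xc.2 == '#')
        (fun xc : Int × Char => (xc.1, PySem.Int.mod i 3))]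
    simp only [h.1, rc]
    simp
  · simp only [if_neg h]
    rw [PySem.List.foldl_append_if (fun xc : Int × Char => xc.2 == '#')
        (fun xc : Int × Char => (xc.1, PySem.Int.mod i 3))]
    simp [rc]

lemma rcList_nil (s : Int) : rcList s [] = [] := by simp [rcList, PySem.List.enumerate]

lemma rcList_cons (s : Int) (a : String) (l : List String) :
    rcList s (a :: l) = rc s a ++ rcList (s + 1) l := by
  simp [rcList, PySem.List.enumerate_cons]

-- the three loop phases: idx ≡ 0, 1, 2 (mod 3)
lemma phases (n : Nat) : ∀ (raw : List String), raw.length ≤ n →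
    (∀ g c (q : Nat), 1 ≤ q →
      finishB (raw.foldl stepB (g, c, ((3*q : Nat) : Int))) = g ++ c :: (chunk3 raw).map (rcList 0)) ∧
    (∀ g c (q : Nat),
      finishB (raw.foldl stepB (g, c, ((3*q+1 : Nat) : Int))) =
        g ++ (c ++ rcList 1 (raw.take 2)) :: (chunk3 (raw.drop 2)).map (rcList 0)) ∧
    (∀ g c (q : Nat),
      finishB (raw.foldl stepB (g, c, ((3*q+2 : Nat) : Int))) =
        g ++ (c ++ rcList 2 (raw.take 1)) :: (chunk3 (raw.drop 1)).map (rcList 0)) := by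
  induction n with
  | zero =>
    intro raw hlen
    have hraw : raw = [] := by cases raw <;> simp_all
    subst hraw
    refine ⟨?_, ?_, ?_⟩ <;> intro g c q
    · intro hq
      have : (0:Int) < ((3*q : Nat) : Int) := by omega
      simp [finishB, chunk3]
      omega
    · have : (0:Int) < ((3*q+1 : Nat) : Int) := by omega
      simp [finishB, chunk3, rcList_nil]
    · have : (0:Int) < ((3*q+2 : Nat) : Int) := by omega
      simp [finishB, chunk3, rcList_nil]
      omega
  | succ n ih =>
    intro raw hlen
    cases raw with
    | nil =>
      refine ⟨?_, ?_, ?_⟩ <;> intro g c q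
      · intro hq
        have : (0:Int) < ((3*q : Nat) : Int) := by omega
        simp [finishB, chunk3]
        omega
      · have : (0:Int) < ((3*q+1 : Nat) : Int) := by omega
        simp [finishB, chunk3, rcList_nil]
      · have : (0:Int) < ((3*q+2 : Nat) : Int) := by omega
        simp [finishB, chunk3, rcList_nil]
        omega
    | cons a rest =>
      have hr := ih rest (by simp at hlen; omega)
      refine ⟨?_, ?_, ?_⟩ <;> intro g c q
      · intro hq
        rw [List.foldl_cons, stepB_eq]
        have hc : PySem.Int.mod ((3*q : Nat) : Int) 3 = 0 ∧ (0:Int) < ((3*q : Nat) : Int) := by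
          rw [PySem.Int.mod_eq_emod_of_pos (by norm_num)]
          constructor <;> omega
        rw [if_pos hc]
        have hidx : ((3*q : Nat) : Int) + 1 = ((3*q+1 : Nat) : Int) := by push_cast; ring
        rw [hidx, hr.2.1 (g ++ [c]) (rc 0 a) q]
        simp [chunk3, rcList_cons]
      · rw [List.foldl_cons, stepB_eq]
        have h1 : PySem.Int.mod ((3*q+1 : Nat) : Int) 3 = 1 := by
          rw [PySem.Int.mod_eq_emod_of_pos (by norm_num)]; omega
        rw [if_neg (by simp : ¬(PySem.Int.mod ((3*q+1 : Nat) : Int) 3 = 0 ∧ (0:Int) < ((3*q+1 : Nat) : Int)))]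
        have hidx : ((3*q+1 : Nat) : Int) + 1 = ((3*q+2 : Nat) : Int) := by push_cast; ring
        rw [h1, hidx, hr.2.2 g (c ++ rc 1 a) q]
        simp [rcList_cons, List.append_assoc]
      · rw [List.foldl_cons, stepB_eq]
        have h2 : PySem.Int.mod ((3*q+2 : Nat) : Int) 3 = 2 := by
          rw [PySem.Int.mod_eq_emod_of_pos (by norm_num)]; omega
        rw [if_neg (by simp : ¬(PySem.Int.mod ((3*q+2 : Nat) : Int) 3 = 0 ∧ (0:Int) < ((3*q+2 : Nat) : Int)))]
        have hidx : ((3*q+2 : Nat) : Int) + 1 = ((3*(q+1) : Nat) : Int) := by push_cast; ring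
        rw [h2, hidx, hr.1 g (c ++ rc 2 a) (q+1) (by omega)]
        simp [rcList_cons, rcList_nil]

lemma B_char (lines : List String) :
    parse_presents_alt lines =
      (chunk3 (lines.filter (fun x => PySem.Str.isIn "#" x))).map (rcList 0) := by
  rw [alt_eq_filter]
  cases h : lines.filter (fun x => PySem.Str.isIn "#" x) with
  | nil => simp [finishB, chunk3]
  | cons a rest =>
    rw [List.foldl_cons, stepB_eq]
    rw [if_neg (by simp)]
    have h0 : PySem.Int.mod (0:Int) 3 = 0 := by decide
    have h1 : (0:Int) + 1 = ((3*0+1 : Nat) : Int) := by norm_num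
    rw [h0, h1, (phases rest.length rest le_rfl).2.1 [] ([] ++ rc 0 a) 0]
    simp [chunk3, rcList_cons]

lemma pyRange3_step (n : Nat) (h : 0 < n) :
    PySem.List.pyRange 0 (n : Int) 3 =
      0 :: (PySem.List.pyRange 0 ((n - 3 : Nat) : Int) 3).map (fun k => k + 3) := by
  rw [PySem.List.pyRange_of_pos _ _ (by norm_num : (0:Int) < 3),
      PySem.List.pyRange_of_pos _ _ (by norm_num : (0:Int) < 3)]
  have hlt : (0:Int) < (n : Int) := by omega
  rw [if_pos hlt]
  have hcount : (((n : Int) - 0 + 3 - 1) / 3).toNat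
      = (if (0:Int) < ((n - 3 : Nat) : Int)
         then ((((n - 3 : Nat) : Int) - 0 + 3 - 1) / 3).toNat else 0) + 1 := by
    split <;> omega
  rw [hcount, List.range_succ_eq_map]
  simp only [List.map_cons, List.map_map]
  refine congrArg₂ List.cons (by norm_num) ?_
  apply List.map_congr_left
  intro k _
  simp only [Function.comp]
  push_cast
  ring

lemma chunks_eq : ∀ (raw : List String),
    (PySem.List.pyRange 0 (raw.length : Int) 3).map
        (fun i => PySem.List.slice raw (some i) (some (i + 3))) = chunk3 raw := by
  have aux : ∀ (N : Nat) (raw : List String), raw.length ≤ N →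
      (PySem.List.pyRange 0 (raw.length : Int) 3).map
          (fun i => PySem.List.slice raw (some i) (some (i + 3))) = chunk3 raw := by
    intro N
    induction N with
    | zero =>
      intro raw h
      have hraw : raw = [] := by cases raw <;> simp_all
      subst hraw
      rw [PySem.List.pyRange_of_pos _ _ (by norm_num : (0:Int) < 3)]
      simp [chunk3]
    | succ N ihN =>
      intro raw h
      cases raw with
      | nil =>
        rw [PySem.List.pyRange_of_pos _ _ (by norm_num : (0:Int) < 3)]
        simp [chunk3]
      | cons a rest =>
        rw [pyRange3_step ((a :: rest).length) (by simp)]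
        simp only [List.map_cons, List.map_map, chunk3]
        refine congrArg₂ List.cons ?_ ?_
        · rw [PySem.List.slice_toNat _ (by norm_num) (by norm_num)]
          norm_num
          rw [show (Int.toNat 3) = 2 + 1 from rfl, List.take_succ_cons]
        · have hlen : ((a :: rest).length - 3 : Nat) = (rest.drop 2).length := by
            simp
          rw [hlen, ← ihN (rest.drop 2) (by simp at h ⊢; omega)]
          apply List.map_congr_left
          intro k hk
          have hk0 : 0 ≤ k := ((PySem.List.mem_pyRange_iff_of_pos
            (by norm_num : (0:Int) < 3) k).mp hk).1
          obtain ⟨m, rfl⟩ : ∃ m : Nat, k = (m : Int) :=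
            ⟨k.toNat, (Int.toNat_of_nonneg hk0).symm⟩
          simp only [Function.comp]
          rw [PySem.List.slice_toNat _ (by omega) (by omega),
              PySem.List.slice_toNat _ (by omega) (by omega)]
          have h1 : ((m : Int) + 3).toNat = m + 3 := by omega
          have h2 : ((m : Int) + 3 + 3).toNat = m + 6 := by omega
          have h3 : ((m : Int)).toNat = m := by omega
          rw [h1, h2, h3]
          have hd : List.drop (m + 3) (a :: rest) = List.drop m (List.drop 2 rest) := by
            rw [List.drop_drop]
            rw [show m + 3 = (2 + m) + 1 by omega, List.drop_succ_cons]
          rw [hd]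
          simp
  intro raw
  exact aux raw.length raw le_rfl

lemma A_char (lines : List String) :
    parse_presents lines =
      (chunk3 (lines.filter (fun x => PySem.Str.isIn "#" x))).map (rcList 0) := by
  have inner : (fun (present : List String) =>
      (PySem.List.enumerate present 0).foldl
        (fun pc yr => (PySem.List.enumerate yr.2.toList 0).foldl
          (fun pc xc => if xc.2 == '#' then pc ++ [(xc.1, yr.1)] else pc) pc)
        ([] : List (Int × Int))) = rcList 0 := by
    funext present
    have hfun : (fun (pc : List (Int × Int)) (yr : Int × String) =>
        (PySem.List.enumerate yr.2.toList 0).foldl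
          (fun pc xc => if xc.2 == '#' then pc ++ [(xc.1, yr.1)] else pc) pc)
        = fun pc yr => pc ++ rc yr.1 yr.2 := by
      funext pc yr
      rw [PySem.List.foldl_append_if (fun xc : Int × Char => xc.2 == '#')
          (fun xc : Int × Char => (xc.1, yr.1))]
      rfl
    rw [hfun, PySem.List.foldl_append_eq_flatMap]
    rfl
  simp only [parse_presents]
  rw [PySem.List.foldl_append_singleton_eq_map]
  rw [inner, chunks_eq]
  rfl

-- ===== VERDICT (by name: the statement is the Claim_ definition above) =====
theorem parse_presents_spec : Claim_equal_parse_presents := by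
  intro lines _
  unfold Spec_parse_presents
  rw [A_char, B_char]
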